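-- pv_equiv track=rewrite | github.com/ierzikova/studying | Stepik_Python/module-1/1-6-7-classes.py | is_parent
-- ===== SOURCE A (Python) =====
-- classes = dict() #словарь, в который будем класть данные в формате {класс : множество потомков}
--
-- def is_parent(parent, kid, classes = classes):
--     """ Проверяем является ли kid потомком parent.
--     Изолируем рекурсивную функцию от глобального неймспейса."""
--     def is_parent_inner(parent, kid, classes):
--         """ Проверяем является ли kid потомком parent.
--         Если нет, то рекурсивно проверяем является ли потомок kid потомком parent.
--         В рекурсии пользуемся булевыми значениями, чтобы экономить память """
--         if kid not in classes.keys():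
--             return False  # Выход из рекурсии, если дошли до конца ветки наследования и не нашли путь до потомка
--         elif parent in classes[kid] or parent == kid:
--             return True # Выход из рекурсии, если kid является потомком parent
--         else:
--             for preparent in classes[kid]:
--                 resp = is_parent_inner(parent, preparent, classes)
--                 if resp is not True: # Здесь с тупиковой ветки наследования возвращаемся \
--                     continue         # к следующему потомку kid, чтобы проверить другую ветку наследования.
--                 else:
--                     return resp      # Но если уже нашли путь до потомка, то выходим из рекурсии.
--
--     if is_parent_inner(parent, kid, classes):
--         return 'Yes'
--     else:
--         return 'No'
-- ===== SOURCE B (Python) =====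
-- def is_parent(parent, kid, classes={}):
--     # Iterative reachable-set closure: saturate the set of ancestors of kid,
--     # then answer with a single membership test.
--     reach = {kid}
--     for _ in range(len(classes)):
--         new = set(reach)
--         for x in reach:
--             if x in classes:
--                 for p in classes[x]:
--                     new.add(p)
--         reach = new
--     return 'Yes' if parent in reach else 'No'
-- ===== Notes on version B (the rewrite author's own statement) =====
-- stated objective: alternative
-- what changed: Replaces A's unmemoized recursive descent with an iterative reachable-set closure followed by one membership test; Pre_ excludes cyclic class graphs, on which A's unbounded recursion overflows the stack (RecursionError) on most queries.
-- intended difference: When parent == kid and kid is not a key of classes, A returns 'No' (it bails out before its parent == kid test) while B returns 'Yes'; B's uniform reflexivity is intended, since A itself answers 'Yes' for parent == kid whenever kid is a key. — e.g. on is_parent("a", "a", []): A returns "No", B returns "Yes"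
-- outside the precondition, e.g. on is_parent('p', 'a', {'a': {'a', 'p'}}): A returns 'Yes', B returns 'Yes'
import Mathlib
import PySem

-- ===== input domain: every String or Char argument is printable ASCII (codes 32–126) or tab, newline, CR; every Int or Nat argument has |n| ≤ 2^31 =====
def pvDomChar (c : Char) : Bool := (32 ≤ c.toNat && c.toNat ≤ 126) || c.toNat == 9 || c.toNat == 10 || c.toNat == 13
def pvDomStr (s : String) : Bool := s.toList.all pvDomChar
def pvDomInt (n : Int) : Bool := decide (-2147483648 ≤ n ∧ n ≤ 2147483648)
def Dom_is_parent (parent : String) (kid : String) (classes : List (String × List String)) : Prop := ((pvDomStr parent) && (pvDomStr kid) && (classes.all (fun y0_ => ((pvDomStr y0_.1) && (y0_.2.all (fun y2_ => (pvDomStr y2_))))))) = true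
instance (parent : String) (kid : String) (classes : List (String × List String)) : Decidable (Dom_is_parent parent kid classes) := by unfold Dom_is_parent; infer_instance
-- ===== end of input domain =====

-- B replaces A's unmemoized recursive search by an iterative reachable-set closure followed by
-- one membership test (a different algorithm of similar measured cost); A = B is proved on
-- duplicate-free acyclic class dictionaries outside the stated reflexivity corner D_.

-- ===== PORT A =====
-- A's inner recursion has no termination guarantee (on cyclic inputs Python overflows the
-- stack); the port adds a fuel argument; fuel = classes.length + 1 is enough on every input
-- Pre_is_parent admits (proved below), so on those inputs the port computes exactly what A computes.
def isParentInner (parent : String) (classes : List (String × List String)) : Nat → String → Bool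
  | 0, _ => false
  | fuel+1, kid =>
    match (PySem.Dict.mk classes).get? kid with
    | none => false                                             -- kid not in classes.keys()
    | some ps =>
      if ps.contains parent || parent == kid then true          -- parent in classes[kid] or parent == kid
      else ps.any (fun p => isParentInner parent classes fuel p) -- the for-loop with early `return resp`

def is_parent (parent : String) (kid : String) (classes : List (String × List String)) : String :=
  if isParentInner parent classes (classes.length + 1) kid then "Yes" else "No"

-- ===== PORT B =====
-- one round of B's closure loop: new = set(reach); for x in reach: if x in classes: for p in classes[x]: new.add(p)
def bRound (classes : List (String × List String)) (reach : PySem.Set String) : PySem.Set String :=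
  reach.foldl (fun acc x =>
    match (PySem.Dict.mk classes).get? x with
    | some ps => ps.foldl (fun acc2 p => PySem.Set.add acc2 p) acc
    | none => acc) reach

def is_parent_alt (parent : String) (kid : String) (classes : List (String × List String)) : String :=
  let reach := (List.range classes.length).foldl (fun R _ => bRound classes R) (PySem.Set.ofList [kid])
  if reach.contains parent then "Yes" else "No"

-- ===== PRECONDITION & SPEC =====
-- standard sink-elimination acyclicity test: repeatedly remove an entry none of whose
-- listed parents is still a key; the fuel is just the list length (each step removes one entry)
def noCycleGo : Nat → List (String × List String) → Bool
  | 0, l => l.isEmpty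
  | n+1, l =>
    match l.find? (fun e => e.2.all (fun p => !((l.map Prod.fst).contains p))) with
    | none => l.isEmpty
    | some e => noCycleGo n (l.erase e)

def noCycle (l : List (String × List String)) : Bool := noCycleGo l.length l

-- Pre_ excludes (a) cyclic class graphs, on which A's unbounded recursion overflows the stack
-- (RecursionError) for almost every query — the few queries it answers before entering the
-- cycle are excluded with it — and (b) association lists with duplicate keys, which do not
-- represent a Python dict unambiguously (first vs last binding).
def Pre_is_parent (parent : String) (kid : String) (classes : List (String × List String)) : Prop :=
  (classes.map Prod.fst).Nodup ∧ noCycle classes = true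
instance (parent : String) (kid : String) (classes : List (String × List String)) : Decidable (Pre_is_parent parent kid classes) := by unfold Pre_is_parent; infer_instance

def pvWitness_is_parent : String × String × (List (String × List String)) :=
  ("A", "C", [("C", ["B"]), ("B", ["A"]), ("A", [])])

-- When parent == kid and kid is not a key of classes, A returns 'No' (it bails out before its
-- parent == kid test) while B returns 'Yes'; B's uniform reflexivity is intended, since A itself
-- answers 'Yes' for parent == kid whenever kid is a key.
def D_is_parent (parent : String) (kid : String) (classes : List (String × List String)) : Prop :=
  parent = kid ∧ kid ∉ classes.map Prod.fst
instance (parent : String) (kid : String) (classes : List (String × List String)) : Decidable (D_is_parent parent kid classes) := by unfold D_is_parent; infer_instance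

def Spec_is_parent (parent : String) (kid : String) (classes : List (String × List String)) (out : String) : Prop := ¬ D_is_parent parent kid classes → out = is_parent_alt parent kid classes
instance (parent : String) (kid : String) (classes : List (String × List String)) (out : String) : Decidable (Spec_is_parent parent kid classes out) := by unfold Spec_is_parent; infer_instance

def pvDiffWitness_is_parent : String × String × (List (String × List String)) := ("a", "a", [])
def pvDiffWitnessOut_is_parent : String × String := ("No", "Yes")

-- ===== CLAIM (what is proved, stated in full; the proofs are below) =====
def Claim_unchanged_is_parent : Prop := ∀ (parent : String) (kid : String) (classes : List (String × List String)), Dom_is_parent parent kid classes → Pre_is_parent parent kid classes → Spec_is_parent parent kid classes (is_parent parent kid classes)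
def Claim_changed_is_parent : Prop := Dom_is_parent (pvDiffWitness_is_parent.1) (pvDiffWitness_is_parent.2.1) (pvDiffWitness_is_parent.2.2) ∧ Pre_is_parent (pvDiffWitness_is_parent.1) (pvDiffWitness_is_parent.2.1) (pvDiffWitness_is_parent.2.2) ∧ D_is_parent (pvDiffWitness_is_parent.1) (pvDiffWitness_is_parent.2.1) (pvDiffWitness_is_parent.2.2) ∧ is_parent (pvDiffWitness_is_parent.1) (pvDiffWitness_is_parent.2.1) (pvDiffWitness_is_parent.2.2) = pvDiffWitnessOut_is_parent.1 ∧ is_parent_alt (pvDiffWitness_is_parent.1) (pvDiffWitness_is_parent.2.1) (pvDiffWitness_is_parent.2.2) = pvDiffWitnessOut_is_parent.2 ∧ pvDiffWitnessOut_is_parent.1 ≠ pvDiffWitnessOut_is_parent.2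
def Claim_exact_is_parent : Prop := ∀ (parent : String) (kid : String) (classes : List (String × List String)), Dom_is_parent parent kid classes → Pre_is_parent parent kid classes → D_is_parent parent kid classes → is_parent parent kid classes ≠ is_parent_alt parent kid classes

-- ===== LEMMAS AND PROOFS =====

-- a "height" measure certifying acyclicity: every edge between keys strictly decreases it,
-- and keys stay strictly below the list length
def IsMeasure (classes : List (String × List String)) (m : String → Nat) : Prop :=
  (∀ x, m x ≤ classes.length) ∧
  (∀ x ps, (PySem.Dict.mk classes).get? x = some ps →
    ∀ p ∈ ps, ((PySem.Dict.mk classes).get? p).isSome → m p < m x) ∧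
  (∀ x, ((PySem.Dict.mk classes).get? x).isSome → m x + 1 ≤ classes.length)

theorem get?_mk_of_mem {l : List (String × List String)} {e : String × List String}
    (he : e ∈ l) (hnd : (l.map Prod.fst).Nodup) :
    (PySem.Dict.mk l).get? e.1 = some e.2 := by
  induction l with
  | nil => cases he
  | cons a t ih =>
    obtain ⟨ak, av⟩ := a
    rw [List.map_cons, List.nodup_cons] at hnd
    rcases List.mem_cons.mp he with rfl | ht
    · simp [PySem.Dict.get?_mk_cons]
    · have hmem : e.1 ∈ t.map Prod.fst := List.mem_map.mpr ⟨e, ht, rfl⟩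
      have hne : (ak == e.1) = false := by
        simp only [beq_eq_false_iff_ne]
        intro h; exact hnd.1 (h ▸ hmem)
      rw [PySem.Dict.get?_mk_cons, hne]
      simp only [Bool.false_eq_true, if_false]
      exact ih ht hnd.2

theorem get?_mk_erase {l : List (String × List String)} {e : String × List String}
    {x : String} (hx : x ≠ e.1) :
    (PySem.Dict.mk (l.erase e)).get? x = (PySem.Dict.mk l).get? x := by
  induction l with
  | nil => rfl
  | cons a t ih =>
    obtain ⟨ak, av⟩ := a
    by_cases hae : (ak, av) = e
    · subst hae
      rw [List.erase_cons_head]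
      rw [PySem.Dict.get?_mk_cons]
      simp [show (ak == x) = false from by simpa using fun h => hx h.symm]
    · rw [List.erase_cons_tail (by simpa using hae)]
      rw [PySem.Dict.get?_mk_cons, PySem.Dict.get?_mk_cons, ih]

theorem measure_exists : ∀ (n : Nat) (l : List (String × List String)),
    l.length ≤ n → (l.map Prod.fst).Nodup → noCycleGo n l = true →
    ∃ m : String → Nat, IsMeasure l m := by
  intro n
  induction n with
  | zero =>
    intro l _ _ hnc
    have hl : l = [] := List.isEmpty_iff.mp (by simpa [noCycleGo] using hnc)
    subst hl
    exact ⟨fun _ => 0, fun _ => Nat.le_refl 0,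
      fun x ps hx => by simp [PySem.Dict.get?] at hx,
      fun x hx => by simp [PySem.Dict.get?] at hx⟩
  | succ n ih =>
    intro l hlen hnd hnc
    rw [noCycleGo] at hnc
    cases hf : l.find? (fun e => e.2.all (fun p => !((l.map Prod.fst).contains p))) with
    | none =>
      rw [hf] at hnc
      have hl : l = [] := List.isEmpty_iff.mp hnc
      subst hl
      exact ⟨fun _ => 0, fun _ => Nat.le_refl 0,
        fun x ps hx => by simp [PySem.Dict.get?] at hx,
        fun x hx => by simp [PySem.Dict.get?] at hx⟩
    | some e =>
      rw [hf] at hnc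
      have he : e ∈ l := List.mem_of_find?_eq_some hf
      have hpred : (e.2.all (fun p => !((l.map Prod.fst).contains p))) = true := List.find?_some (p := fun (e : String × List String) => e.2.all (fun p => !((l.map Prod.fst).contains p))) hf
      have hnd' : ((l.erase e).map Prod.fst).Nodup := hnd.sublist ((List.erase_sublist).map Prod.fst)
      have hlen' : (l.erase e).length ≤ n := by
        rw [List.length_erase_of_mem he]
        omega
      obtain ⟨m', hm'b, hm'e, hm'k⟩ := ih (l.erase e) hlen' hnd' hnc
      have hpos : 1 ≤ l.length := List.length_pos_of_mem he
      have hkey_erase : ∀ x, x ≠ e.1 → ((PySem.Dict.mk l).get? x).isSome →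
          ((PySem.Dict.mk (l.erase e)).get? x).isSome := by
        intro x hxe hx
        rw [get?_mk_erase hxe]; exact hx
      refine ⟨fun x => if x = e.1 then 0 else m' x + 1, ?_, ?_, ?_⟩
      · intro x
        by_cases hx : x = e.1
        · simp [hx]
        · have := hm'b x
          rw [List.length_erase_of_mem he] at this
          simp only [hx, if_false]
          omega
      · intro x ps hx p hp hkp
        by_cases hxe : x = e.1
        · exfalso
          subst hxe
          have hxx := get?_mk_of_mem he hnd
          rw [hxx] at hx
          have hps : ps = e.2 := by injection hx.symm
          subst hps
          have hnk : ¬ ((l.map Prod.fst).contains p = true) := by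
            simpa using (List.all_eq_true.mp hpred p hp)
          apply hnk
          rw [List.contains_iff_mem]
          have : ¬ ((PySem.Dict.mk l).get? p = none) := by
            intro h; rw [h] at hkp; exact (by simp at hkp)
          have := (not_iff_not.mpr (PySem.Dict.get?_eq_none_iff_not_mem_keys (PySem.Dict.mk l) p)).mp this
          simpa [PySem.Dict.keys_mk] using this
        · have hx' : (PySem.Dict.mk (l.erase e)).get? x = some ps := by
            rw [get?_mk_erase hxe]; exact hx
          by_cases hpe : p = e.1
          · simp [hxe, hpe]
          · have hkp' : ((PySem.Dict.mk (l.erase e)).get? p).isSome := by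
              rw [get?_mk_erase hpe]; exact hkp
            have := hm'e x ps hx' p hp hkp'
            simp only [hxe, hpe, if_false]
            omega
      · intro x hx
        by_cases hxe : x = e.1
        · show (if x = e.1 then 0 else m' x + 1) + 1 ≤ l.length
          rw [if_pos hxe]
          omega
        · have := hm'k x (hkey_erase x hxe hx)
          rw [List.length_erase_of_mem he] at this
          simp only [hxe, if_false]
          omega

-- membership in one closure round
theorem mem_bRound_aux {classes : List (String × List String)} {y : String} :
    ∀ (L : List String) (acc : PySem.Set String),
    y ∈ L.foldl (fun acc x =>
      match (PySem.Dict.mk classes).get? x with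
      | some ps => ps.foldl (fun acc2 p => PySem.Set.add acc2 p) acc
      | none => acc) acc ↔
      y ∈ acc ∨ ∃ x ∈ L, ∃ ps, (PySem.Dict.mk classes).get? x = some ps ∧ y ∈ ps := by
  intro L
  induction L with
  | nil => intro acc; simp
  | cons x L ih =>
    intro acc
    rw [List.foldl_cons, ih]
    cases hx : (PySem.Dict.mk classes).get? x with
    | none =>
      simp only
      constructor
      · rintro (h | ⟨x', hx', ps', h1, h2⟩)
        · exact Or.inl h
        · exact Or.inr ⟨x', List.mem_cons_of_mem _ hx', ps', h1, h2⟩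
      · rintro (h | ⟨x', hx', ps', h1, h2⟩)
        · exact Or.inl h
        · rcases List.mem_cons.mp hx' with rfl | hmem
          · rw [hx] at h1; cases h1
          · exact Or.inr ⟨x', hmem, ps', h1, h2⟩
    | some ps =>
      simp only
      rw [show (List.foldl (fun acc2 p => PySem.Set.add acc2 p) acc ps) =
            (List.foldl (fun s b => PySem.Set.add s ((fun p => p) b)) acc ps) from rfl]
      constructor
      · rintro (h | ⟨x', hx', ps', h1, h2⟩)
        · rcases (PySem.Set.mem_foldl_add ps (fun p => p) acc y).mp h with h | ⟨b, hb, rfl⟩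
          · exact Or.inl h
          · exact Or.inr ⟨x, List.mem_cons_self, ps, hx, hb⟩
        · exact Or.inr ⟨x', List.mem_cons_of_mem _ hx', ps', h1, h2⟩
      · rintro (h | ⟨x', hx', ps', h1, h2⟩)
        · exact Or.inl ((PySem.Set.mem_foldl_add ps (fun p => p) acc y).mpr (Or.inl h))
        · rcases List.mem_cons.mp hx' with rfl | hmem
          · rw [hx] at h1; injection h1 with h1; subst h1
            exact Or.inl ((PySem.Set.mem_foldl_add ps (fun p => p) acc y).mpr (Or.inr ⟨y, h2, rfl⟩))
          · exact Or.inr ⟨x', hmem, ps', h1, h2⟩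

theorem mem_bRound {classes : List (String × List String)} {R : PySem.Set String} {y : String} :
    y ∈ bRound classes R ↔ y ∈ R ∨ ∃ x ∈ R, ∃ ps, (PySem.Dict.mk classes).get? x = some ps ∧ y ∈ ps := by
  exact mem_bRound_aux R R

theorem any_congr_mem {α : Type} {l : List α} {p q : α → Bool} (h : ∀ a ∈ l, p a = q a) :
    l.any p = l.any q := by
  induction l with
  | nil => rfl
  | cons a t ih =>
    simp only [List.any_cons, h a List.mem_cons_self,
      ih (fun b hb => h b (List.mem_cons_of_mem _ hb))]

-- the closure after k rounds
def Sit (classes : List (String × List String)) (kid : String) : Nat → PySem.Set String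
  | 0 => PySem.Set.ofList [kid]
  | k+1 => bRound classes (Sit classes kid k)

theorem foldl_range_bRound (classes : List (String × List String)) (kid : String) (n : Nat) :
    (List.range n).foldl (fun R _ => bRound classes R) (PySem.Set.ofList [kid]) = Sit classes kid n := by
  induction n with
  | zero => rfl
  | succ k ih => rw [List.range_succ, List.foldl_append, ih]; rfl

theorem Sit_mono {classes : List (String × List String)} {kid : String} {j j' : Nat}
    (h : j ≤ j') {x : String} (hx : x ∈ Sit classes kid j) : x ∈ Sit classes kid j' := by
  induction j' with
  | zero => simpa [Nat.le_zero.mp h] using hx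
  | succ k ih =>
    rcases Nat.lt_or_ge j (k+1) with hlt | hge
    · exact mem_bRound.mpr (Or.inl (ih (Nat.lt_succ_iff.mp hlt)))
    · simpa [Nat.le_antisymm h hge] using hx

theorem kid_mem_Sit (classes : List (String × List String)) (kid : String) (k : Nat) :
    kid ∈ Sit classes kid k :=
  Sit_mono (Nat.zero_le k) (by simp [Sit, PySem.Set.mem_ofList])

-- any member of Sit k is kid or listed among the parents of some member of an earlier round
theorem mem_Sit_cases {classes : List (String × List String)} {kid z : String} :
    ∀ k, z ∈ Sit classes kid k →
      z = kid ∨ ∃ j, ∃ y ∈ Sit classes kid j, ∃ ps,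
        (PySem.Dict.mk classes).get? y = some ps ∧ z ∈ ps := by
  intro k
  induction k with
  | zero => intro hz; exact Or.inl (by simpa [Sit, PySem.Set.mem_ofList] using hz)
  | succ k ih =>
    intro hz
    rcases mem_bRound.mp hz with hz' | ⟨y, hy, ps, h1, h2⟩
    · exact ih hz'
    · exact Or.inr ⟨k, y, hy, ps, h1, h2⟩

theorem inner_not_key {parent : String} {classes : List (String × List String)} {p : String}
    (h : (PySem.Dict.mk classes).get? p = none) (f : Nat) :
    isParentInner parent classes f p = false := by
  cases f with
  | zero => rfl
  | succ f' => simp [isParentInner, h]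

theorem inner_stable {parent : String} {classes : List (String × List String)} {m : String → Nat}
    (hm : IsMeasure classes m) :
    ∀ f x, m x + 1 ≤ f → isParentInner parent classes f x = isParentInner parent classes (m x + 1) x := by
  intro f
  induction f using Nat.strong_induction_on with
  | _ f ihf =>
    intro x hf
    obtain ⟨f', rfl⟩ : ∃ f', f = f' + 1 := ⟨f - 1, by omega⟩
    rw [isParentInner, isParentInner]
    cases hget : (PySem.Dict.mk classes).get? x with
    | none => rfl
    | some ps =>
      simp only
      cases hhit : (ps.contains parent || parent == x) with
      | true => rfl
      | false =>
        simp only [Bool.false_eq_true, if_false]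
        apply any_congr_mem
        intro p hp
        cases hpk : (PySem.Dict.mk classes).get? p with
        | none => rw [inner_not_key hpk, inner_not_key hpk]
        | some qs =>
          have hlt : m p < m x := hm.2.1 x ps hget p hp (by rw [hpk]; rfl)
          rw [ihf f' (by omega) p (by omega),
              ihf (m x) (by omega) p (by omega)]

theorem sound {parent kid : String} {classes : List (String × List String)} {m : String → Nat}
    (hm : IsMeasure classes m) :
    ∀ k x, x ∈ Sit classes kid k → isParentInner parent classes (m x + 1) x = true →
      isParentInner parent classes (m kid + 1) kid = true := by
  intro k
  induction k with
  | zero =>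
    intro x hx ht
    have hxk : x = kid := by simpa [Sit, PySem.Set.mem_ofList] using hx
    subst hxk; exact ht
  | succ k ih =>
    intro x hx ht
    rcases mem_bRound.mp (show x ∈ bRound classes (Sit classes kid k) from hx) with
      hx' | ⟨y, hy, ps, hgy, hxps⟩
    · exact ih x hx' ht
    · apply ih y hy
      rw [isParentInner]
      simp only [hgy]
      cases hhit : (ps.contains parent || parent == y) with
      | true => rfl
      | false =>
        simp only [Bool.false_eq_true, if_false]
        have hxkey : ((PySem.Dict.mk classes).get? x).isSome := by
          cases hq : (PySem.Dict.mk classes).get? x with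
          | none => rw [inner_not_key hq] at ht; cases ht
          | some qs => rfl
        have hlt : m x < m y := hm.2.1 y ps hgy x hxps hxkey
        have hxv : isParentInner parent classes (m y) x = true := by
          rw [inner_stable hm (m y) x (by omega)]; exact ht
        exact List.any_eq_true.mpr ⟨x, hxps, hxv⟩

theorem comp {parent kid : String} {classes : List (String × List String)} {m : String → Nat}
    (hm : IsMeasure classes m) :
    ∀ x k, x ∈ Sit classes kid k → isParentInner parent classes (m x + 1) x = true →
      ∃ y ∈ Sit classes kid (k + m x), ∃ ps, (PySem.Dict.mk classes).get? y = some ps ∧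
        (ps.contains parent || parent == y) = true := by
  suffices H : ∀ N x k, m x = N → x ∈ Sit classes kid k →
      isParentInner parent classes (m x + 1) x = true →
      ∃ y ∈ Sit classes kid (k + m x), ∃ ps, (PySem.Dict.mk classes).get? y = some ps ∧
        (ps.contains parent || parent == y) = true by
    exact fun x k hx ht => H (m x) x k rfl hx ht
  intro N
  induction N using Nat.strong_induction_on with
  | _ N ihN =>
    intro x k hN hx ht
    rw [isParentInner] at ht
    cases hg : (PySem.Dict.mk classes).get? x with
    | none =>
      rw [hg] at ht
      exact absurd (show false = true from ht) (by simp)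
    | some ps =>
      rw [hg] at ht
      have ht' : (if (ps.contains parent || parent == x) = true then true
          else ps.any fun p => isParentInner parent classes (m x) p) = true := ht
      cases hhit : (ps.contains parent || parent == x) with
      | true => exact ⟨x, Sit_mono (Nat.le_add_right k (m x)) hx, ps, hg, hhit⟩
      | false =>
        rw [hhit] at ht'
        simp only [Bool.false_eq_true, if_false] at ht'
        obtain ⟨p, hpmem, hpt⟩ := List.any_eq_true.mp ht'
        have hpkey : ((PySem.Dict.mk classes).get? p).isSome := by
          cases hq : (PySem.Dict.mk classes).get? p with
          | none => rw [inner_not_key hq] at hpt; cases hpt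
          | some qs => rfl
        have hlt : m p < m x := hm.2.1 x ps hg p hpmem hpkey
        have hpt' : isParentInner parent classes (m p + 1) p = true := by
          rw [← inner_stable hm (m x) p (by omega)]; exact hpt
        have hp1 : p ∈ Sit classes kid (k + 1) :=
          mem_bRound.mpr (Or.inr ⟨x, hx, ps, hg, hpmem⟩)
        obtain ⟨y, hy, ps', h1, h2⟩ := ihN (m p) (by omega) p (k + 1) rfl hp1 hpt'
        exact ⟨y, Sit_mono (by omega) hy, ps', h1, h2⟩

-- key bridge: outside D_, A's recursion succeeds iff parent lies in B's closure
theorem inner_iff_mem_Sit {parent kid : String} {classes : List (String × List String)}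
    {m : String → Nat} (hm : IsMeasure classes m)
    (hD : ¬ D_is_parent parent kid classes) :
    isParentInner parent classes (classes.length + 1) kid = true ↔
    parent ∈ Sit classes kid classes.length := by
  constructor
  · intro h
    have hkid : isParentInner parent classes (m kid + 1) kid = true := by
      rw [← inner_stable hm (classes.length + 1) kid (by have := hm.1 kid; omega)]
      exact h
    have hkidkey : ((PySem.Dict.mk classes).get? kid).isSome := by
      cases hq : (PySem.Dict.mk classes).get? kid with
      | none => rw [inner_not_key hq] at hkid; cases hkid
      | some qs => rfl
    have hkidlt : m kid + 1 ≤ classes.length := hm.2.2 kid hkidkey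
    have hkid0 : kid ∈ Sit classes kid 0 := by simp [Sit, PySem.Set.mem_ofList]
    obtain ⟨y, hy, ps, hg, hh⟩ := comp hm kid 0 hkid0 hkid
    rcases Bool.or_eq_true_iff.mp hh with hin | heq
    · -- parent listed among y's parents: one more round puts it in the closure
      have hy' : y ∈ Sit classes kid (classes.length - 1) :=
        Sit_mono (by omega) hy
      have : parent ∈ Sit classes kid (classes.length - 1 + 1) :=
        mem_bRound.mpr (Or.inr ⟨y, hy', ps, hg, List.contains_iff_mem.mp hin⟩)
      have hlen : classes.length - 1 + 1 = classes.length := by omega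
      rwa [hlen] at this
    · have hpy : parent = y := by simpa using heq
      subst hpy
      exact Sit_mono (by omega) hy
  · intro h
    rcases mem_Sit_cases classes.length h with rfl | ⟨j, y, hy, ps, hg, hmem⟩
    · -- parent = kid: ¬D_ forces the class to be a key, and then A hits its parent == kid test
      cases hg : (PySem.Dict.mk classes).get? parent with
      | none =>
        exfalso
        apply hD
        refine ⟨rfl, ?_⟩
        have := (PySem.Dict.get?_eq_none_iff_not_mem_keys (PySem.Dict.mk classes) parent).mp hg
        simpa [PySem.Dict.keys_mk, PySem.Set.mem_ofList] using this
      | some ps =>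
        rw [isParentInner, hg]
        simp
    · -- parent ∈ classes[y] for a reachable key y: A succeeds at y, hence at kid
      have hyt : isParentInner parent classes (m y + 1) y = true := by
        rw [isParentInner, hg]
        simp [hmem]
      have := sound hm j y hy hyt
      rw [inner_stable hm (classes.length + 1) kid (by have := hm.1 kid; omega)]
      exact this

-- ===== VERDICT (by name: the statement is the Claim_ definition above) =====
theorem is_parent_spec : Claim_unchanged_is_parent := by
  intro parent kid classes _ hpre
  obtain ⟨hnd, hnc⟩ := hpre
  obtain ⟨m, hm⟩ := measure_exists classes.length classes (Nat.le_refl _) hnd hnc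
  intro hD
  simp only [is_parent, is_parent_alt, foldl_range_bRound]
  have hiff := inner_iff_mem_Sit hm hD
  by_cases h : isParentInner parent classes (classes.length + 1) kid = true
  · rw [if_pos h]
    simp [PySem.Set.contains, hiff.mp h]
  · rw [if_neg h]
    have hnm : parent ∉ Sit classes kid classes.length := fun hc => h (hiff.mpr hc)
    simp [PySem.Set.contains, hnm]

theorem is_parent_changed : Claim_changed_is_parent := by
  unfold Claim_changed_is_parent; decide

theorem is_parent_tight : Claim_exact_is_parent := by
  intro parent kid classes _ _ hD
  obtain ⟨rfl, hnk⟩ := hD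
  have hg : (PySem.Dict.mk classes).get? parent = none := by
    rw [PySem.Dict.get?_eq_none_iff_not_mem_keys]
    simpa [PySem.Dict.keys_mk, PySem.Set.mem_ofList] using hnk
  have hA : is_parent parent parent classes = "No" := by
    unfold is_parent
    rw [show isParentInner parent classes (classes.length + 1) parent = false from by
      rw [isParentInner, hg]]
    simp
  have hB : is_parent_alt parent parent classes = "Yes" := by
    unfold is_parent_alt
    simp only [foldl_range_bRound]
    simp [PySem.Set.contains, kid_mem_Sit classes parent classes.length]
  rw [hA, hB]
  decide
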